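-- pv_equiv track=rewrite | github.com/pypi-data/pypi-mirror-347 | packages/genagent/genagent-0.1.0.tar.gz/genagent-0.1.0/genagent/llm_utils.py | ant_prep
-- ===== SOURCE A (Python) =====
-- def ant_prep(messages):
--   '''
--   Prepare messages for Anthropic API, which doesn't support system messages.
--   Uses the first system message as system param, converts other system messages to user.
--   '''
--   modified_messages = []
--   system_content = None
--
--   # Process messages, keeping their original order
--   for msg in messages:
--     if msg["role"] == "system":
--       if system_content is None:
--         # Use the first system message as the system parameter
--         system_content = msg["content"]
--       else:
--         # Convert additional system messages to user messages
--         modified_messages.append({"role": "user", "content": msg["content"]})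
--     else:
--       # Keep non-system messages as they are
--       modified_messages.append(msg)
--
--   return modified_messages, system_content
-- ===== SOURCE B (Python) =====
-- def ant_prep(messages):
--   # Two-pass decomposition: first find the first system message (index + content),
--   # then rebuild the list skipping that index and converting other system messages.
--   first_idx = None
--   system_content = None
--   for i, msg in enumerate(messages):
--     if msg["role"] == "system":
--       first_idx = i
--       system_content = msg["content"]
--       break
--   rebuilt = []
--   for i, msg in enumerate(messages):
--     if i == first_idx:
--       continue
--     if msg["role"] == "system":
--       rebuilt.append({"role": "user", "content": msg["content"]})
--     else:
--       rebuilt.append(msg)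
--   return rebuilt, system_content
-- ===== Notes on version B (the rewrite author's own statement) =====
-- stated objective: alternative
-- what changed: Replaces A's single flag-driven pass (system_content doubling as the 'seen first system' flag) with a two-pass structure: a find-first-system scan with break, then an index-based rebuild that skips the found index and converts remaining system messages.
import Mathlib
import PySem

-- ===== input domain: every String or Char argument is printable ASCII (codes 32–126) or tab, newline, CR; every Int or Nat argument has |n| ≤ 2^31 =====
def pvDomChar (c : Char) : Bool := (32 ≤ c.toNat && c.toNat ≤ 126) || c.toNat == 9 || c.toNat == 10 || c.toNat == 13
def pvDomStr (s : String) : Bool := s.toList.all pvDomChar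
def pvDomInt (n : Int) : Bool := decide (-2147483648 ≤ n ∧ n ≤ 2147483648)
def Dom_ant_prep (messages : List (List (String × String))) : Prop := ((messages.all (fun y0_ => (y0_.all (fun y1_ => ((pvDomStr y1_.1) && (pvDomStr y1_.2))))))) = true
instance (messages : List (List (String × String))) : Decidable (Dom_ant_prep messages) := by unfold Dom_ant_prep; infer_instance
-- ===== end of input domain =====

-- ===== PORT A =====
-- B restructures A's single flag-driven pass into a two-pass find-then-rebuild decomposition (alternative, same cost).
-- A-side helper: the loop body of A's single pass.
-- Note: '(List.lookup "content" msg).getD ""' stands for msg["content"]; the missing-key case (KeyError) is excluded by Pre_.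
def antStep (acc : (List (List (String × String))) × Option String) (msg : List (String × String)) :
    (List (List (String × String))) × Option String :=
  if List.lookup "role" msg = some "system" then
    match acc.2 with
    | none => (acc.1, some ((List.lookup "content" msg).getD ""))
    | some _ => (acc.1 ++ [[("role", "user"), ("content", (List.lookup "content" msg).getD "")]], acc.2)
  else
    (acc.1 ++ [msg], acc.2)

def ant_prep (messages : List (List (String × String))) : (List (List (String × String))) × Option String :=
  messages.foldl antStep ([], none)

-- ===== PORT B =====
-- first loop of Source B: scan for the first system message, recording its index and content (break on hit)
def findSys : List (List (String × String)) → Int → Option (Int × String)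
  | [], _ => none
  | m :: rest, i =>
    if List.lookup "role" m = some "system" then some (i, (List.lookup "content" m).getD "")
    else findSys rest (i + 1)

-- second loop of Source B: rebuild, skipping the found index, converting other system messages
def rebuild (fi : Option Int) : List (Int × List (String × String)) → List (List (String × String))
  | [] => []
  | (i, m) :: rest =>
    if some i = fi then rebuild fi rest
    else if List.lookup "role" m = some "system" then
      [("role", "user"), ("content", (List.lookup "content" m).getD "")] :: rebuild fi rest
    else m :: rebuild fi rest

def ant_prep_alt (messages : List (List (String × String))) : (List (List (String × String))) × Option String :=
  let f := findSys messages 0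
  (rebuild (f.map (·.1)) (PySem.List.enumerate messages), f.map (·.2))

-- ===== PRECONDITION & SPEC =====
-- Pre_ excludes exactly the inputs where Python A raises KeyError: a message without a "role" key,
-- or a system message without a "content" key.
def Pre_ant_prep (messages : List (List (String × String))) : Prop :=
  ∀ m ∈ messages, (List.lookup "role" m).isSome ∧
    (List.lookup "role" m = some "system" → (List.lookup "content" m).isSome)
instance (messages : List (List (String × String))) : Decidable (Pre_ant_prep messages) := by
  unfold Pre_ant_prep; infer_instance

def pvWitness_ant_prep : (List (List (String × String))) :=
  [[("role", "system"), ("content", "be brief")],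
   [("role", "user"), ("content", "hi")],
   [("role", "system"), ("content", "more rules")]]

def Spec_ant_prep (messages : List (List (String × String))) (out : (List (List (String × String))) × Option String) : Prop := out = ant_prep_alt messages
instance (messages : List (List (String × String))) (out : (List (List (String × String))) × Option String) : Decidable (Spec_ant_prep messages out) := by unfold Spec_ant_prep; infer_instance

-- ===== CLAIM (what is proved, stated in full; the proofs are below) =====
def Claim_equal_ant_prep : Prop := ∀ (messages : List (List (String × String))), Dom_ant_prep messages → Pre_ant_prep messages → Spec_ant_prep messages (ant_prep messages)

-- ===== LEMMAS AND PROOFS =====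

-- common reference function: what one message becomes after the first system message was consumed
def pvConv (m : List (String × String)) : List (String × String) :=
  if List.lookup "role" m = some "system" then
    [("role", "user"), ("content", (List.lookup "content" m).getD "")]
  else m

-- common reference: the intended result
def pvSpec : List (List (String × String)) → (List (List (String × String))) × Option String
  | [] => ([], none)
  | m :: rest =>
    if List.lookup "role" m = some "system" then
      (rest.map pvConv, some ((List.lookup "content" m).getD ""))
    else
      (m :: (pvSpec rest).1, (pvSpec rest).2)

-- A-side: once system_content is set, the loop just appends conversions
theorem foldl_antStep_some (rest : List (List (String × String)))
    (mod : List (List (String × String))) (c : String) :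
    rest.foldl antStep (mod, some c) = (mod ++ rest.map pvConv, some c) := by
  induction rest generalizing mod with
  | nil => simp
  | cons m t ih =>
    simp only [List.foldl_cons, List.map_cons, antStep, pvConv]
    split_ifs with h <;> simp [ih]

-- A-side: the full loop computes pvSpec
theorem foldl_antStep_none (msgs : List (List (String × String)))
    (mod : List (List (String × String))) :
    msgs.foldl antStep (mod, none) = (mod ++ (pvSpec msgs).1, (pvSpec msgs).2) := by
  induction msgs generalizing mod with
  | nil => simp [pvSpec]
  | cons m t ih =>
    simp only [List.foldl_cons, antStep, pvSpec]
    split_ifs with h <;> simp [foldl_antStep_some, ih]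

theorem ant_prep_eq_pvSpec (msgs : List (List (String × String))) :
    ant_prep msgs = pvSpec msgs := by
  simpa using foldl_antStep_none msgs []

-- B-side: findSys only returns indices ≥ the start index
theorem findSys_ge (msgs : List (List (String × String))) (k : Int) (p : Int × String)
    (h : findSys msgs k = some p) : k ≤ p.1 := by
  induction msgs generalizing k with
  | nil => simp [findSys] at h
  | cons m t ih =>
    simp only [findSys] at h
    split_ifs at h with hm
    · cases h; simp
    · have := ih (k + 1) h; omega

-- B-side: rebuilding past the skipped index converts every message
theorem rebuild_past (msgs : List (List (String × String))) (s j : Int) (hj : j < s) :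
    rebuild (some j) (PySem.List.enumerate msgs s) = msgs.map pvConv := by
  induction msgs generalizing s with
  | nil => simp [rebuild]
  | cons m t ih =>
    rw [PySem.List.enumerate_cons]
    simp only [rebuild, pvConv]
    have hne : ¬ (some s = some j) := by intro h; cases h; omega
    rw [if_neg hne]
    split_ifs with h <;> simp [pvConv, h, ih (s + 1) (by omega)]

-- B-side: the two-pass construction computes pvSpec, for any start index
theorem rebuild_findSys (msgs : List (List (String × String))) (k : Int) :
    (rebuild ((findSys msgs k).map (·.1)) (PySem.List.enumerate msgs k),
      (findSys msgs k).map (·.2)) = pvSpec msgs := by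
  induction msgs generalizing k with
  | nil => simp [findSys, rebuild, pvSpec]
  | cons m t ih =>
    rw [PySem.List.enumerate_cons]
    simp only [findSys, pvSpec]
    split_ifs with h
    · simp only [Option.map_some, rebuild]
      rw [rebuild_past t (k + 1) k (by omega)]
      simp
    · have hne : ∀ p, findSys t (k + 1) = some p → ¬ (some k = some p.1) := by
        intro p hp hk
        have := findSys_ge t (k + 1) p hp
        cases hk; omega
      rcases hf : findSys t (k + 1) with _ | p
      · simp only [Option.map_none, rebuild]
        rw [if_neg (by simp), if_neg h]
        have := ih (k + 1); rw [hf] at this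
        simp only [Option.map_none] at this
        rw [Prod.ext_iff] at this ⊢
        simpa using this
      · simp only [Option.map_some, rebuild]
        rw [if_neg (hne p hf), if_neg h]
        have := ih (k + 1); rw [hf] at this
        simp only [Option.map_some] at this
        rw [Prod.ext_iff] at this ⊢
        simpa using this

theorem ant_prep_alt_eq_pvSpec (msgs : List (List (String × String))) :
    ant_prep_alt msgs = pvSpec msgs := by
  unfold ant_prep_alt
  exact rebuild_findSys msgs 0

-- ===== VERDICT (by name: the statement is the Claim_ definition above) =====
theorem ant_prep_spec : Claim_equal_ant_prep := by
  intro messages _ _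
  unfold Spec_ant_prep
  rw [ant_prep_eq_pvSpec, ant_prep_alt_eq_pvSpec]
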